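-- pv_equiv track=rewrite | github.com/smaranan2019/fixMeMoney | ocr_api/app.py | checkForPreviousBalance
-- ===== SOURCE A (Python) =====
-- def checkForPreviousBalance(transactions):
--     # Variable to keep track of the last valid transaction date
--     last_valid_date = None
--     # Check if the first transaction has 'PREVIOUS BALANCE' and handle it
--     if 'PREVIOUS BALANCE' in transactions[0]['desc']:
--         last_valid_date = transactions[0]['transDate']
--         # Remove "PREVIOUS BALANCE"
--         transactions.pop(0)
--         # Iterate through the modified list
--         for transaction in transactions:
--             if last_valid_date is not None:
--                 current_valid_date = transaction['transDate']
--                 # Update transDate to previous transDate, last_valid_date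
--                 transaction['transDate'] = last_valid_date
--             last_valid_date = current_valid_date
--     return transactions
-- ===== SOURCE B (Python) =====
-- def checkForPreviousBalance(transactions):
--     # Two-pass version: if the first row is a PREVIOUS BALANCE row, pop it,
--     # snapshot the shifted date table, then assign dates by index.
--     if 'PREVIOUS BALANCE' not in transactions[0]['desc']:
--         return transactions
--     first = transactions.pop(0)
--     dates = [first['transDate']] + [t['transDate'] for t in transactions]
--     for i, transaction in enumerate(transactions):
--         transaction['transDate'] = dates[i]
--     return transactions
-- ===== Notes on version B (the rewrite author's own statement) =====
-- stated objective: simpler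
-- what changed: Replaces A's single pass with a running last_valid_date/current_valid_date accumulator by a two-pass structure: pop the PREVIOUS BALANCE row, precompute the shifted date table, then assign dates by index with enumerate.
import Mathlib
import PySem

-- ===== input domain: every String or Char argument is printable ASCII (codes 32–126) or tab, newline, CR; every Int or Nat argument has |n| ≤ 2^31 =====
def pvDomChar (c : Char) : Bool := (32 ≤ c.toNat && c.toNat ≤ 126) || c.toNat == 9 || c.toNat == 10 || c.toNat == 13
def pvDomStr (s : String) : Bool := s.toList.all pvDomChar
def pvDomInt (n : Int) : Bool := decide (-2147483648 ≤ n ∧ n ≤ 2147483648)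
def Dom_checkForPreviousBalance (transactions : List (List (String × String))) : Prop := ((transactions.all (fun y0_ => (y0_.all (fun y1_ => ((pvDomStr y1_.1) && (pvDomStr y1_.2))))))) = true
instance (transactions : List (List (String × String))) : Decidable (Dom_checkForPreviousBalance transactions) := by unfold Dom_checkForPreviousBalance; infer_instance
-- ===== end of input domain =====

-- B replaces A's running-accumulator single pass by pop-then-precomputed-date-table two-pass
-- (objective: simpler). Both Pythons mutate the input list/dicts in place; the equivalence
-- proved here is about the RETURN value only.

-- shared dict primitives: d[k] lookup and d[k] = v assignment on the association list
def dget (t : List (String × String)) (k : String) : Option String :=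
  (PySem.Dict.mk t).get? k
def dset (t : List (String × String)) (k : String) (v : String) : List (String × String) :=
  ((PySem.Dict.mk t).insert k v).items

-- ===== PORT A =====
def checkForPreviousBalance (transactions : List (List (String × String))) : List (List (String × String)) :=
  match transactions with
  | [] => []                     -- transactions[0]: IndexError, excluded by Pre_
  | t0 :: rest =>
    match dget t0 "desc" with
    | none => transactions       -- KeyError 'desc', excluded by Pre_
    | some d =>
      if PySem.Str.isIn "PREVIOUS BALANCE" d then
        match dget t0 "transDate" with
        | none => transactions   -- KeyError 'transDate', excluded by Pre_
        | some lvd0 =>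
          -- pop(0) then the for-loop; state = (rebuilt list so far, last_valid_date)
          (rest.foldl
            (fun (st : List (List (String × String)) × Option String) tr =>
              match st.2 with
              | some lvd =>
                match dget tr "transDate" with
                | some cur => (st.1 ++ [dset tr "transDate" lvd], some cur)
                | none => (st.1 ++ [tr], none)   -- KeyError 'transDate', excluded by Pre_
              | none => (st.1 ++ [tr], none)     -- unreachable: last_valid_date is never None in the loop
            ) ([], some lvd0)).1
      else transactions
  -- where Python raises (marked above) the port returns a placeholder; Pre_ excludes those inputs

-- ===== PORT B =====
def checkForPreviousBalance_alt (transactions : List (List (String × String))) : List (List (String × String)) :=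
  match transactions with
  | [] => []                     -- transactions[0]: IndexError, excluded by Pre_
  | t0 :: rest =>
    match dget t0 "desc" with
    | none => transactions       -- KeyError 'desc', excluded by Pre_
    | some d =>
      if ¬ PySem.Str.isIn "PREVIOUS BALANCE" d then transactions
      else
        -- dates table; a `none` entry is the KeyError in the comprehension, excluded by Pre_
        let dates : List (Option String) := dget t0 "transDate" :: rest.map (fun t => dget t "transDate")
        (PySem.List.enumerate rest).map (fun p =>
          match PySem.List.pyGetD dates p.1 none with
          | some dt => dset p.2 "transDate" dt
          | none => p.2)         -- unreachable under Pre_ (KeyError already raised building dates)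

-- ===== PRECONDITION & SPEC =====
-- Pre_ excludes exactly the inputs where Python A raises: the empty list (IndexError),
-- a first row without 'desc' (KeyError), and — when the PREVIOUS BALANCE branch fires —
-- any row without 'transDate' (KeyError).
def Pre_checkForPreviousBalance (transactions : List (List (String × String))) : Prop :=
  match transactions with
  | [] => False
  | t0 :: _ =>
    ∃ d, dget t0 "desc" = some d ∧
      (PySem.Str.isIn "PREVIOUS BALANCE" d = true →
        ∀ t ∈ transactions, (dget t "transDate").isSome = true)
instance (transactions : List (List (String × String))) : Decidable (Pre_checkForPreviousBalance transactions) := by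
  unfold Pre_checkForPreviousBalance
  cases transactions with
  | nil => exact inferInstance
  | cons t0 rest =>
    exact decidable_of_iff ((dget t0 "desc").isSome = true ∧
      (∀ d, dget t0 "desc" = some d → PySem.Str.isIn "PREVIOUS BALANCE" d = true →
        ∀ t ∈ t0 :: rest, (dget t "transDate").isSome = true))
      (by
        constructor
        · rintro ⟨h1, h2⟩
          rcases Option.isSome_iff_exists.mp h1 with ⟨d, hd⟩
          exact ⟨d, hd, h2 d hd⟩
        · rintro ⟨d, hd, h⟩
          exact ⟨by simp [hd], fun d' hd' => by rw [hd] at hd'; cases hd'; exact h⟩)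

def pvWitness_checkForPreviousBalance : (List (List (String × String))) :=
  [[("desc", "PREVIOUS BALANCE"), ("transDate", "01/02")],
   [("desc", "coffee"), ("transDate", "01/05")]]

def Spec_checkForPreviousBalance (transactions : List (List (String × String))) (out : List (List (String × String))) : Prop := out = checkForPreviousBalance_alt transactions
instance (transactions : List (List (String × String))) (out : List (List (String × String))) : Decidable (Spec_checkForPreviousBalance transactions out) := by unfold Spec_checkForPreviousBalance; infer_instance

-- ===== CLAIM (what is proved, stated in full; the proofs are below) =====
def Claim_equal_checkForPreviousBalance : Prop := ∀ (transactions : List (List (String × String))), Dom_checkForPreviousBalance transactions → Pre_checkForPreviousBalance transactions → Spec_checkForPreviousBalance transactions (checkForPreviousBalance transactions)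

-- ===== LEMMAS AND PROOFS =====

-- the common value of both programs: shift each remaining row's date to the previous row's date
def shiftDates (lvd : String) : List (List (String × String)) → List (List (String × String))
  | [] => []
  | t :: rs =>
    match dget t "transDate" with
    | some c => dset t "transDate" lvd :: shiftDates c rs
    | none => []    -- never reached under the hypotheses of the lemmas below

def stepA (st : List (List (String × String)) × Option String) (tr : List (String × String)) :
    List (List (String × String)) × Option String :=
  match st.2 with
  | some lvd =>
    match dget tr "transDate" with
    | some cur => (st.1 ++ [dset tr "transDate" lvd], some cur)
    | none => (st.1 ++ [tr], none)
  | none => (st.1 ++ [tr], none)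

lemma foldA_eq_shift (rs : List (List (String × String))) :
    ∀ (acc : List (List (String × String))) (lvd : String),
    (∀ t ∈ rs, (dget t "transDate").isSome = true) →
    ∃ l, rs.foldl stepA (acc, some lvd) = (acc ++ shiftDates lvd rs, some l) := by
  induction rs with
  | nil => intro acc lvd _; exact ⟨lvd, by simp [shiftDates]⟩
  | cons t rs ih =>
    intro acc lvd h
    rcases Option.isSome_iff_exists.mp (h t (by simp)) with ⟨c, hc⟩
    have hstep : stepA (acc, some lvd) t = (acc ++ [dset t "transDate" lvd], some c) := by
      simp [stepA, hc]
    rcases ih (acc ++ [dset t "transDate" lvd]) c (fun t' ht' => h t' (by simp [ht'])) with ⟨l, hl⟩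
    exact ⟨l, by simp [List.foldl_cons, hstep, hl, shiftDates, hc]⟩

lemma mapB_eq_shift (rs : List (List (String × String))) :
    ∀ (D0 : List (Option String)) (lvd : String),
    (∀ t ∈ rs, (dget t "transDate").isSome = true) →
    (PySem.List.enumerate rs (D0.length : Int)).map (fun p =>
        match PySem.List.pyGetD (D0 ++ some lvd :: rs.map (fun t => dget t "transDate")) p.1 none with
        | some dt => dset p.2 "transDate" dt
        | none => p.2) = shiftDates lvd rs := by
  induction rs with
  | nil => intro D0 lvd _; simp [PySem.List.enumerate, shiftDates]
  | cons t rs ih =>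
    intro D0 lvd h
    rcases Option.isSome_iff_exists.mp (h t (by simp)) with ⟨c, hc⟩
    rw [PySem.List.enumerate_cons, List.map_cons]
    have h0 : PySem.List.pyGetD (D0 ++ some lvd :: (t :: rs).map (fun t => dget t "transDate"))
        (D0.length : Int) none = some lvd := by
      rw [PySem.List.pyGetD_natCast]
      simp
    have htail := ih (D0 ++ [some lvd]) c (fun t' ht' => h t' (by simp [ht']))
    have harr : (D0 ++ [some lvd]) ++ some c :: rs.map (fun t => dget t "transDate")
        = D0 ++ some lvd :: (t :: rs).map (fun t => dget t "transDate") := by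
      simp [hc]
    have hlen : ((D0 ++ [some lvd]).length : Int) = (D0.length : Int) + 1 := by
      simp
    rw [harr, hlen] at htail
    rw [h0, htail, shiftDates, hc]

-- ===== VERDICT (by name: the statement is the Claim_ definition above) =====
theorem checkForPreviousBalance_spec : Claim_equal_checkForPreviousBalance := by
  intro transactions _ hpre
  unfold Spec_checkForPreviousBalance
  match transactions with
  | [] => exact absurd hpre (by simp [Pre_checkForPreviousBalance])
  | t0 :: rest =>
    rcases hpre with ⟨d, hd, hdates⟩
    by_cases hin : PySem.Str.isIn "PREVIOUS BALANCE" d = true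
    · have hall := hdates hin
      rcases Option.isSome_iff_exists.mp (hall t0 (by simp)) with ⟨lvd0, hlvd0⟩
      rcases foldA_eq_shift rest [] lvd0 (fun t' ht' => hall t' (by simp [ht'])) with ⟨l, hl⟩
      have hB := mapB_eq_shift rest [] lvd0 (fun t' ht' => hall t' (by simp [ht']))
      simp only [List.nil_append, List.length_nil, Nat.cast_zero] at hB hl
      simp only [checkForPreviousBalance, checkForPreviousBalance_alt, hd, hin, hlvd0]
      have hfold : rest.foldl (fun (st : List (List (String × String)) × Option String) tr =>
          match st.2 with
          | some lvd =>
            match dget tr "transDate" with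
            | some cur => (st.1 ++ [dset tr "transDate" lvd], some cur)
            | none => (st.1 ++ [tr], none)
          | none => (st.1 ++ [tr], none)) ([], some lvd0)
          = rest.foldl stepA ([], some lvd0) := rfl
      rw [hfold, hl]
      simpa using hB.symm
    · rw [Bool.not_eq_true] at hin
      simp only [checkForPreviousBalance, checkForPreviousBalance_alt, hd, hin]
      simp
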